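-- pv_equiv track=rewrite | github.com/KrashKart/python-problems | indiv_solutions/023-count_growlers.py | count_growlers
-- ===== SOURCE A (Python) =====
-- def count_growlers(animals):
--     cds, growls = [0, 0], 0
--     lefts, rights = ["cat", "dog"], ["tac", "god"]
--     for i in range(len(animals)):
--         if animals[i] in lefts:
--             growls += 1 if cds[1] > cds[0] else 0
--         cds[lefts.index(animals[i]) if animals[i] in lefts else rights.index(animals[i])] += 1
--
--     cds = [0, 0]
--     for i in range(len(animals) - 1, -1, -1):
--         if animals[i] in rights:
--             growls += 1 if cds[1] > cds[0] else 0
--         cds[lefts.index(animals[i]) if animals[i] in lefts else rights.index(animals[i])] += 1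
--
--     return growls
-- ===== SOURCE B (Python) =====
-- def count_growlers(animals):
--     total_cats = total_dogs = 0
--     for a in animals:
--         if a in ("cat", "tac"):
--             total_cats += 1
--         elif a in ("dog", "god"):
--             total_dogs += 1
--         else:
--             raise ValueError(f"{a!r} is not in list")
--     growls = left_cats = left_dogs = 0
--     for a in animals:
--         if a in ("cat", "dog"):          # faces left
--             if left_dogs > left_cats:
--                 growls += 1
--         else:                            # faces right
--             right_cats = total_cats - left_cats - (a == "tac")
--             right_dogs = total_dogs - left_dogs - (a == "god")
--             if right_dogs > right_cats:
--                 growls += 1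
--         if a in ("cat", "tac"):
--             left_cats += 1
--         else:
--             left_dogs += 1
--     return growls
-- ===== Notes on version B (the rewrite author's own statement) =====
-- stated objective: alternative
-- what changed: Replaces A's two directional scans (a forward pass and a second reversed pass over the list) with one totals pre-count plus a single left-to-right pass that decides left- and right-facing growls together from running prefix counts.
import Mathlib
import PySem

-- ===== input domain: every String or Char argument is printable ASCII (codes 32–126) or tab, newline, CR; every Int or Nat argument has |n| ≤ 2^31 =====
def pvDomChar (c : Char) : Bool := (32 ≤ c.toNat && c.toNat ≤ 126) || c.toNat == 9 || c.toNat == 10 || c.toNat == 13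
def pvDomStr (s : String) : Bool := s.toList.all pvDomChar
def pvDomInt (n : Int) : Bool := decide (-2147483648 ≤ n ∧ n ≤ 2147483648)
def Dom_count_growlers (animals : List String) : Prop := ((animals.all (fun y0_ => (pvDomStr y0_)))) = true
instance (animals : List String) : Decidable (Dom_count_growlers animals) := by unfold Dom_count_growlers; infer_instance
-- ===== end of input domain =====

-- B replaces A's forward+reversed double scan with a totals pre-count and one forward pass;
-- same O(n) cost, proved equal on all lists of valid tokens (Pre_ excludes tokens on which A raises ValueError).

-- ===== PORT A =====
def pvLefts : List String := ["cat", "dog"]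
def pvRights : List String := ["tac", "god"]

-- cds[...] += 1: index 0 for cat/tac, 1 for dog/god (Python raises ValueError on any other token; outside Pre_)
def pvBump (cds : Int × Int) (a : String) : Int × Int :=
  let i : Nat :=
    if pvLefts.contains a then (PySem.List.index? pvLefts a).getD 0
    else (PySem.List.index? pvRights a).getD 1
  if i = 0 then (cds.1 + 1, cds.2) else (cds.1, cds.2 + 1)

-- first loop body: growl for left-facers when dogs-so-far > cats-so-far, then bump
def pvStepA1 (s : (Int × Int) × Int) (a : String) : (Int × Int) × Int :=
  let g := if pvLefts.contains a then (if s.1.2 > s.1.1 then s.2 + 1 else s.2) else s.2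
  (pvBump s.1 a, g)

-- second loop body: growl for right-facers; the loop runs over indices len-1 .. 0, i.e. the reversed list
def pvStepA2 (s : (Int × Int) × Int) (a : String) : (Int × Int) × Int :=
  let g := if pvRights.contains a then (if s.1.2 > s.1.1 then s.2 + 1 else s.2) else s.2
  (pvBump s.1 a, g)

def count_growlers (animals : List String) : Int :=
  let s1 := animals.foldl pvStepA1 ((0, 0), 0)
  let s2 := animals.reverse.foldl pvStepA2 ((0, 0), s1.2)
  s2.2

-- ===== PORT B =====
-- totals loop of Source B (the else branch raises ValueError in Python; outside Pre_)
def pvTotals (animals : List String) : Int × Int :=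
  animals.foldl (fun t a =>
    if a = "cat" ∨ a = "tac" then (t.1 + 1, t.2)
    else if a = "dog" ∨ a = "god" then (t.1, t.2 + 1)
    else t) (0, 0)

-- main loop body of Source B; state = ((left_cats, left_dogs), growls)
def pvStepB (tc td : Int) (s : (Int × Int) × Int) (a : String) : (Int × Int) × Int :=
  let g :=
    if a = "cat" ∨ a = "dog" then
      (if s.1.2 > s.1.1 then s.2 + 1 else s.2)
    else
      let rc := tc - s.1.1 - (if a = "tac" then 1 else 0)
      let rd := td - s.1.2 - (if a = "god" then 1 else 0)
      (if rd > rc then s.2 + 1 else s.2)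
  let lc := if a = "cat" ∨ a = "tac" then (s.1.1 + 1, s.1.2) else (s.1.1, s.1.2 + 1)
  (lc, g)

def count_growlers_alt (animals : List String) : Int :=
  let t := pvTotals animals
  (animals.foldl (pvStepB t.1 t.2) ((0, 0), 0)).2

-- ===== PRECONDITION & SPEC =====
-- Pre_ excludes lists containing any token other than "cat"/"dog"/"tac"/"god": there A's list.index raises ValueError (and B raises too).
def Pre_count_growlers (animals : List String) : Prop :=
  ∀ a ∈ animals, a = "cat" ∨ a = "dog" ∨ a = "tac" ∨ a = "god"
instance (animals : List String) : Decidable (Pre_count_growlers animals) := by unfold Pre_count_growlers; infer_instance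

def pvWitness_count_growlers : List String := (["cat", "god", "dog", "tac", "dog"])

def Spec_count_growlers (animals : List String) (out : Int) : Prop := out = count_growlers_alt animals
instance (animals : List String) (out : Int) : Decidable (Spec_count_growlers animals out) := by unfold Spec_count_growlers; infer_instance

-- ===== CLAIM (what is proved, stated in full; the proofs are below) =====
def Claim_equal_count_growlers : Prop := ∀ (animals : List String), Dom_count_growlers animals → Pre_count_growlers animals → Spec_count_growlers animals (count_growlers animals)

-- ===== LEMMAS AND PROOFS =====

-- counts of cat-kind (cat/tac) and dog-kind (dog/god) tokens
def pvCats : List String → Int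
  | [] => 0
  | a :: t => (if a = "cat" ∨ a = "tac" then 1 else 0) + pvCats t

def pvDogs : List String → Int
  | [] => 0
  | a :: t => (if a = "dog" ∨ a = "god" then 1 else 0) + pvDogs t

-- growls of left-facers, given (c,d) cat/dog counts already to the left
def pvLsum : List String → Int → Int → Int
  | [], _, _ => 0
  | a :: t, c, d =>
      (if (a = "cat" ∨ a = "dog") ∧ d > c then 1 else 0) +
      pvLsum t (c + (if a = "cat" ∨ a = "tac" then 1 else 0)) (d + (if a = "dog" ∨ a = "god" then 1 else 0))

-- growls of right-facers, given (c,d) counts already accumulated after the list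
def pvRsum : List String → Int → Int → Int
  | [], _, _ => 0
  | a :: t, c, d =>
      pvRsum t c d + (if (a = "tac" ∨ a = "god") ∧ d + pvDogs t > c + pvCats t then 1 else 0)

theorem pvLoopA1 (xs : List String) (c d g : Int)
    (h : ∀ a ∈ xs, a = "cat" ∨ a = "dog" ∨ a = "tac" ∨ a = "god") :
    xs.foldl pvStepA1 ((c, d), g) = ((c + pvCats xs, d + pvDogs xs), g + pvLsum xs c d) := by
  induction xs generalizing c d g with
  | nil => simp [pvCats, pvDogs, pvLsum]
  | cons a t ih =>
    have ht : ∀ b ∈ t, b = "cat" ∨ b = "dog" ∨ b = "tac" ∨ b = "god" := fun b hb => h b (by simp [hb])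
    rcases h a (by simp) with ha | ha | ha | ha <;> subst ha
    all_goals
      rw [List.foldl_cons]
      simp [pvStepA1, pvBump, pvLefts, pvRights, PySem.List.index?, List.idxOf?,
        List.findIdx?_cons, pvCats, pvDogs, pvLsum]
      rw [ih _ _ _ ht]
      simp only [Prod.mk.injEq]
      and_intros <;> first | trivial | linarith | (split_ifs <;> linarith)

theorem pvLoopA2 (xs : List String) (c d g : Int)
    (h : ∀ a ∈ xs, a = "cat" ∨ a = "dog" ∨ a = "tac" ∨ a = "god") :
    xs.reverse.foldl pvStepA2 ((c, d), g) = ((c + pvCats xs, d + pvDogs xs), g + pvRsum xs c d) := by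
  induction xs generalizing c d g with
  | nil => simp [pvCats, pvDogs, pvRsum]
  | cons a t ih =>
    have ht : ∀ b ∈ t, b = "cat" ∨ b = "dog" ∨ b = "tac" ∨ b = "god" := fun b hb => h b (by simp [hb])
    rw [List.reverse_cons, List.foldl_append, ih _ _ _ ht, List.foldl_cons, List.foldl_nil]
    rcases h a (by simp) with ha | ha | ha | ha <;> subst ha
    all_goals
      simp [pvStepA2, pvBump, pvLefts, pvRights, PySem.List.index?, List.idxOf?,
        List.findIdx?_cons, pvCats, pvDogs, pvRsum]
      try simp only [Prod.mk.injEq]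
      and_intros <;> first | trivial | linarith | (split_ifs <;> linarith)

theorem pvTotalsEq (xs : List String) (c d : Int)
    (h : ∀ a ∈ xs, a = "cat" ∨ a = "dog" ∨ a = "tac" ∨ a = "god") :
    xs.foldl (fun t a =>
      if a = "cat" ∨ a = "tac" then (t.1 + 1, t.2)
      else if a = "dog" ∨ a = "god" then (t.1, t.2 + 1)
      else t) (c, d) = (c + pvCats xs, d + pvDogs xs) := by
  induction xs generalizing c d with
  | nil => simp [pvCats, pvDogs]
  | cons a t ih =>
    have ht : ∀ b ∈ t, b = "cat" ∨ b = "dog" ∨ b = "tac" ∨ b = "god" := fun b hb => h b (by simp [hb])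
    rcases h a (by simp) with ha | ha | ha | ha <;> subst ha
    all_goals
      rw [List.foldl_cons]
      simp [pvCats, pvDogs]
      rw [ih _ _ ht]
      simp only [Prod.mk.injEq]
      and_intros <;> first | trivial | linarith

theorem pvLoopB (xs : List String) (lc ld g tc td : Int)
    (h : ∀ a ∈ xs, a = "cat" ∨ a = "dog" ∨ a = "tac" ∨ a = "god")
    (hc : tc = lc + pvCats xs) (hd : td = ld + pvDogs xs) :
    xs.foldl (pvStepB tc td) ((lc, ld), g) = ((tc, td), g + pvLsum xs lc ld + pvRsum xs 0 0) := by
  induction xs generalizing lc ld g with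
  | nil =>
    simp [pvCats, pvDogs] at hc hd
    simp [pvLsum, pvRsum, hc, hd]
  | cons a t ih =>
    have ht : ∀ b ∈ t, b = "cat" ∨ b = "dog" ∨ b = "tac" ∨ b = "god" := fun b hb => h b (by simp [hb])
    rcases h a (by simp) with ha | ha | ha | ha <;> subst ha
    all_goals
      simp [pvCats, pvDogs] at hc hd
      rw [List.foldl_cons]
      simp [pvStepB, pvLsum, pvRsum]
      rw [ih _ _ _ ht (by linarith) (by linarith)]
      simp only [Prod.mk.injEq]
      and_intros <;> first | trivial | linarith | (split_ifs <;> linarith)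

-- ===== VERDICT (by name: the statement is the Claim_ definition above) =====
theorem count_growlers_spec : Claim_equal_count_growlers := by
  intro animals _ hpre
  show count_growlers animals = count_growlers_alt animals
  simp only [count_growlers, count_growlers_alt, pvTotals]
  rw [pvLoopA1 animals 0 0 0 hpre, pvLoopA2 animals 0 0 _ hpre,
      pvTotalsEq animals 0 0 hpre]
  rw [pvLoopB animals 0 0 0 _ _ hpre (by simp) (by simp)]
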